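-- pv_equiv track=rewrite | github.com/Kvkthecreator/yarnnnn | api/services/back_office/reviewer_reflection.py | _find_fence
-- ===== SOURCE A (Python) =====
-- _YAML_FENCE = "---"
--
-- def _find_fence(text: str, start: int) -> int | None:
--     """Return the index of the next `---` at line-start, or None."""
--     idx = start
--     while idx < len(text):
--         # Either at beginning of string or preceded by newline
--         if idx == 0 or text[idx - 1] == "\n":
--             if text.startswith(_YAML_FENCE, idx):
--                 # Allow trailing whitespace before the newline
--                 eol = text.find("\n", idx)
--                 if eol == -1:
--                     eol = len(text)
--                 between = text[idx + len(_YAML_FENCE):eol].strip()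
--                 if not between:
--                     return idx
--         idx += 1
--     return None
-- ===== SOURCE B (Python) =====
-- _YAML_FENCE = "---"
--
-- def _find_fence(text, start):
--     """Return the index of the next `---` at line-start, or None.
--
--     Line-jumping rewrite: instead of advancing one character at a time and
--     testing whether each position is a line start, hop directly from one
--     line start to the next with str.find.
--     """
--     pos = 0
--     while True:
--         nl = text.find("\n", pos)
--         end = len(text) if nl == -1 else nl
--         if pos >= start and text.startswith(_YAML_FENCE, pos) and not text[pos + 3:end].strip():
--             return pos
--         if nl == -1:
--             return None
--         pos = nl + 1
-- ===== Notes on version B (the rewrite author's own statement) =====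
-- stated objective: faster
-- what changed: B hops directly from one line start to the next with str.find instead of advancing one character at a time and re-testing every index for being a line start; the scan work moves into C-level str.find.
-- intended difference: For negative start with a whitespace-padded '---' line start found via Python's negative-index wraparound in the tail of the text, A returns that negative index while B returns the first real fence index from position 0 (or None); the result is used as a string index, so a non-negative index is the intended value. — e.g. on _find_fence("x\n---\n", -4): A returns some (-4), B returns some 2
import Mathlib
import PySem

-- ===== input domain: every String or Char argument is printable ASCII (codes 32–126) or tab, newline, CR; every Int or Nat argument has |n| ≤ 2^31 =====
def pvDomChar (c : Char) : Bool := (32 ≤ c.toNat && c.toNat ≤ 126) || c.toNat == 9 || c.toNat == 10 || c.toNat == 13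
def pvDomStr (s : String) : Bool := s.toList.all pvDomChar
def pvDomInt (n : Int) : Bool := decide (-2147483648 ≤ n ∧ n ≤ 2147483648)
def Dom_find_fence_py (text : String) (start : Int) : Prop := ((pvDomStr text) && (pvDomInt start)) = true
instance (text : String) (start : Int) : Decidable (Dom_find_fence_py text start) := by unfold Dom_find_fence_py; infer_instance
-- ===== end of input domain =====

-- B replaces A's one-character-at-a-time scan (testing every index for being a line
-- start) by hopping directly from line start to line start with str.find; same O(n)
-- class, with the scan work done by str.find (measured faster in a timing run).

-- ===== PORT A =====

-- _YAML_FENCE = "---"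
def pvFence : List Char := ['-', '-', '-']

-- the while-loop of A; the fuel argument only makes the recursion structural (the loop
-- advances idx by 1 while idx < len, so `(len - start) + 1` steps always suffice);
-- `text[idx-1]` is PySem.List.pyGet? (none = IndexError, excluded by Pre_);
-- `text.startswith("---", idx)` is ported as slice-then-startswith, exact for a
-- nonempty prefix; `text.find("\n", idx)` is PySem.Chars.findFrom (exact).
def pvALoop (fuel : Nat) (cs : List Char) (idx : Int) : Option Int :=
  match fuel with
  | 0 => none
  | fuel + 1 =>
    if idx < (cs.length : Int) then
      if idx = 0 ∨ PySem.List.pyGet? cs (idx - 1) = some '\n' then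
        if PySem.Chars.startswith (PySem.List.slice cs (some idx) none) pvFence then
          let eol0 := PySem.Chars.findFrom cs ['\n'] idx none
          let eol : Int := if eol0 = -1 then (cs.length : Int) else eol0
          let between := PySem.Chars.strip (PySem.List.slice cs (some (idx + 3)) (some eol))
          if between = [] then some idx else pvALoop fuel cs (idx + 1)
        else pvALoop fuel cs (idx + 1)
      else pvALoop fuel cs (idx + 1)
    else none

def find_fence_py (text : String) (start : Int) : Option Int :=
  pvALoop (((text.toList.length : Int) - start).toNat + 1) text.toList start

-- ===== PORT B =====

-- the while-loop of B (Source B), hopping from line start to line start; the fuel argument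
-- only makes the recursion structural (each hop moves pos past a newline, so len + 1
-- steps always suffice).
def pvBLoop (fuel : Nat) (cs : List Char) (start : Int) (pos : Nat) : Option Int :=
  match fuel with
  | 0 => none
  | fuel + 1 =>
    let nl := PySem.Chars.findFrom cs ['\n'] (pos : Int) none
    let endi : Int := if nl = -1 then (cs.length : Int) else nl
    if start ≤ (pos : Int) ∧
        PySem.Chars.startswith (PySem.List.slice cs (some (pos : Int)) none) pvFence = true ∧
        PySem.Chars.strip (PySem.List.slice cs (some ((pos : Int) + 3)) (some endi)) = [] then
      some (pos : Int)
    else if nl = -1 then none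
    else pvBLoop fuel cs start (nl.toNat + 1)

def find_fence_py_alt (text : String) (start : Int) : Option Int :=
  pvBLoop (text.toList.length + 1) text.toList start 0

-- ===== PRECONDITION & SPEC =====

-- Pre_ excludes exactly the inputs on which A raises IndexError:
-- start < 0 with start + len(text) <= 0 makes text[idx-1] fall off the left end.
def Pre_find_fence_py (text : String) (start : Int) : Prop :=
  0 ≤ start ∨ 0 < start + (text.toList.length : Int)
instance (text : String) (start : Int) : Decidable (Pre_find_fence_py text start) := by
  unfold Pre_find_fence_py; infer_instance

def pvWitness_find_fence_py : String × Int := ("x\n---\n", 0)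

-- the line beginning at character index q of cs
def pvLineAt (cs : List Char) (q : Nat) : List Char := (cs.drop q).takeWhile (· ≠ '\n')

-- "---" followed by whitespace only
def pvIsFenceLine (l : List Char) : Bool :=
  pvFence.isPrefixOf l && (l.drop 3).all PySem.Chars.isspace

-- For negative start where Python's negative-index wraparound finds a whitespace-padded
-- '---' line start in the tail of the text, A returns that negative index; B returns the
-- first real fence index from position 0 (or None) — the intended value, since the
-- result is used as a string index.
def D_find_fence_py (text : String) (start : Int) : Prop :=
  start < 0 ∧ ∃ i ∈ PySem.List.pyRange (max start (-(text.toList.length : Int))) (-3) 1,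
    PySem.List.pyGet? text.toList (i - 1) = some '\n' ∧
    pvIsFenceLine (pvLineAt text.toList ((text.toList.length : Int) + i).toNat) = true
instance (text : String) (start : Int) : Decidable (D_find_fence_py text start) := by
  unfold D_find_fence_py; infer_instance

def Spec_find_fence_py (text : String) (start : Int) (out : Option Int) : Prop :=
  ¬ D_find_fence_py text start → out = find_fence_py_alt text start
instance (text : String) (start : Int) (out : Option Int) : Decidable (Spec_find_fence_py text start out) := by
  unfold Spec_find_fence_py; infer_instance

def pvDiffWitness_find_fence_py : String × Int := ("x\n---\n", -4)
def pvDiffWitnessOut_find_fence_py : (Option Int) × (Option Int) := (some (-4), some 2)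

-- ===== CLAIM (what is proved, stated in full; the proofs are below) =====
def Claim_unchanged_find_fence_py : Prop := ∀ (text : String) (start : Int), Dom_find_fence_py text start → Pre_find_fence_py text start → Spec_find_fence_py text start (find_fence_py text start)
def Claim_changed_find_fence_py : Prop := Dom_find_fence_py (pvDiffWitness_find_fence_py.1) (pvDiffWitness_find_fence_py.2) ∧ Pre_find_fence_py (pvDiffWitness_find_fence_py.1) (pvDiffWitness_find_fence_py.2) ∧ D_find_fence_py (pvDiffWitness_find_fence_py.1) (pvDiffWitness_find_fence_py.2) ∧ find_fence_py (pvDiffWitness_find_fence_py.1) (pvDiffWitness_find_fence_py.2) = pvDiffWitnessOut_find_fence_py.1 ∧ find_fence_py_alt (pvDiffWitness_find_fence_py.1) (pvDiffWitness_find_fence_py.2) = pvDiffWitnessOut_find_fence_py.2 ∧ pvDiffWitnessOut_find_fence_py.1 ≠ pvDiffWitnessOut_find_fence_py.2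
def Claim_exact_find_fence_py : Prop := ∀ (text : String) (start : Int), Dom_find_fence_py text start → Pre_find_fence_py text start → D_find_fence_py text start → find_fence_py text start ≠ find_fence_py_alt text start
-- ===== LEMMAS AND PROOFS =====

-- the `eol` both loops compute at position i
def pvEol (cs : List Char) (i : Int) : Int :=
  if PySem.Chars.findFrom cs ['\n'] i none = -1 then (cs.length : Int)
  else PySem.Chars.findFrom cs ['\n'] i none

-- the fence test both loops perform at position i
abbrev pvTestP (cs : List Char) (i : Int) : Prop :=
  PySem.Chars.startswith (PySem.List.slice cs (some i) none) pvFence = true ∧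
  PySem.Chars.strip (PySem.List.slice cs (some (i + 3)) (some (pvEol cs i))) = []

-- A's full per-position test
def pvGood (cs : List Char) (j : Nat) : Bool :=
  decide ((j = 0 ∨ PySem.List.pyGet? cs ((j : Int) - 1) = some '\n') ∧ pvTestP cs (j : Int))

-- A's loop unfolding, repackaged through pvTestP
theorem pvALoop_succ (cs : List Char) (fuel : Nat) (idx : Int) :
    pvALoop (fuel + 1) cs idx =
      if idx < (cs.length : Int) then
        if idx = 0 ∨ PySem.List.pyGet? cs (idx - 1) = some '\n' then
          if pvTestP cs idx then some idx else pvALoop fuel cs (idx + 1)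
        else pvALoop fuel cs (idx + 1)
      else none := by
  simp only [pvALoop, pvTestP, pvEol]
  split_ifs with h1 h2 h3 h4 h5 h6 h7 <;> simp_all

-- B's loop unfolding, repackaged through pvTestP
theorem pvBLoop_succ (cs : List Char) (fuel : Nat) (s : Int) (pos : Nat) :
    pvBLoop (fuel + 1) cs s pos =
      if s ≤ (pos : Int) ∧ pvTestP cs (pos : Int) then some (pos : Int)
      else if PySem.Chars.findFrom cs ['\n'] (pos : Int) none = -1 then none
      else pvBLoop fuel cs s ((PySem.Chars.findFrom cs ['\n'] (pos : Int) none).toNat + 1) := by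
  simp only [pvBLoop, pvTestP, pvEol]
  split_ifs with h1 h2 h3 <;> simp_all

-- fuel does not matter once it exceeds the remaining distance
theorem pvALoop_fuel (cs : List Char) : ∀ (f1 f2 : Nat) (idx : Int),
    ((cs.length : Int) - idx).toNat < f1 → ((cs.length : Int) - idx).toNat < f2 →
    pvALoop f1 cs idx = pvALoop f2 cs idx := by
  intro f1
  induction f1 with
  | zero => intro f2 idx h1 h2; omega
  | succ f1 ih =>
    intro f2 idx h1 h2
    cases f2 with
    | zero => omega
    | succ f2 =>
      rw [pvALoop_succ, pvALoop_succ]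
      by_cases hlt : idx < (cs.length : Int)
      · simp only [if_pos hlt]
        have := ih f2 (idx + 1) (by omega) (by omega)
        split_ifs <;> simp_all
      · simp [hlt]

theorem pvALoop_char (cs : List Char) (fuel : Nat) : ∀ (j : Nat), cs.length - j < fuel →
    pvALoop fuel cs (j : Int) =
      ((List.range' j (cs.length - j)).find? (pvGood cs)).map (fun k => (k : Int)) := by
  induction fuel with
  | zero => intro j h; omega
  | succ fuel ih =>
    intro j hf
    rw [pvALoop_succ]
    by_cases hj : j < cs.length
    · rw [if_pos (by exact_mod_cast hj)]
      rw [show cs.length - j = (cs.length - (j + 1)) + 1 from by omega, List.range'_succ,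
        List.find?_cons]
      have hcast : ((j : Int) = 0 ∨ PySem.List.pyGet? cs ((j : Int) - 1) = some '\n') ↔
          (j = 0 ∨ PySem.List.pyGet? cs ((j : Int) - 1) = some '\n') := by
        rw [Int.natCast_eq_zero]
      by_cases hline : ((j : Int) = 0 ∨ PySem.List.pyGet? cs ((j : Int) - 1) = some '\n')
      · rw [if_pos hline]
        by_cases htest : pvTestP cs (j : Int)
        · rw [if_pos htest]
          have : pvGood cs j = true := by
            simp only [pvGood, decide_eq_true_eq]
            exact ⟨hcast.mp hline, htest⟩
          simp [this]
        · rw [if_neg htest]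
          have hg : pvGood cs j = false := by
            simp only [pvGood, decide_eq_false_iff_not]
            exact fun h => htest h.2
          rw [hg]
          have := ih (j + 1) (by omega)
          simpa using this
      · rw [if_neg hline]
        have hg : pvGood cs j = false := by
          simp only [pvGood, decide_eq_false_iff_not]
          intro h
          exact hline (hcast.mpr h.1)
        rw [hg]
        have := ih (j + 1) (by omega)
        simpa using this
    · rw [if_neg (by exact_mod_cast hj)]
      rw [show cs.length - j = 0 from by omega]
      simp

theorem pvSingletonPrefixIff (c : Char) (l : List Char) : [c] <+: l ↔ l.head? = some c := by
  cases l with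
  | nil => simp
  | cons a t => simp [List.cons_prefix_cons, eq_comm]

-- `cs` has a newline at position i (i ≥ pos) iff `['\n']` is a prefix of a suffix
theorem pvNlAt (cs : List Char) (i : Nat) : ['\n'] <+: cs.drop i ↔ cs[i]? = some '\n' := by
  rw [pvSingletonPrefixIff, List.head?_drop]

-- pvGood at a known line start is just the fence test
theorem pvGood_linestart (cs : List Char) (pos : Nat)
    (hls : pos = 0 ∨ (1 ≤ pos ∧ cs[pos - 1]? = some '\n')) :
    pvGood cs pos = decide (pvTestP cs (pos : Int)) := by
  have h1 : (pos = 0 ∨ PySem.List.pyGet? cs ((pos : Int) - 1) = some '\n') := by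
    rcases hls with h | ⟨h0, h⟩
    · exact Or.inl h
    · refine Or.inr ?_
      have heq : (pos : Int) - 1 = ((pos - 1 : Nat) : Int) := by omega
      rw [heq, PySem.List.pyGet?_natCast]
      exact h
  simp [pvGood, h1]

-- a position whose predecessor is not a newline fails pvGood
theorem pvGood_not_linestart (cs : List Char) (j : Nat) (hj : 1 ≤ j)
    (h : cs[j - 1]? ≠ some '\n') : pvGood cs j = false := by
  simp only [pvGood, decide_eq_false_iff_not]
  rintro ⟨h1 | h1, -⟩
  · omega
  · apply h
    have : (j : Int) - 1 = ((j - 1 : Nat) : Int) := by omega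
    rwa [this, PySem.List.pyGet?_natCast] at h1

-- startswith at an in-range position forces three more characters
theorem pvTestP_lt (cs : List Char) (pos : Nat) (h : pvTestP cs (pos : Int)) :
    pos + 3 ≤ cs.length := by
  obtain ⟨hsw, -⟩ := h
  rw [PySem.List.slice_from_natCast] at hsw
  have := ((PySem.Chars.startswith_iff _ _).mp hsw).length_le
  simp [pvFence, List.length_drop] at this
  omega

theorem pvBLoop_char (cs : List Char) (fuel : Nat) (s : Int) : ∀ (pos : Nat),
    cs.length - pos < fuel → pos ≤ cs.length → (pos = 0 ∨ (1 ≤ pos ∧ cs[pos - 1]? = some '\n')) →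
    pvBLoop fuel cs s pos =
      ((List.range' pos (cs.length - pos)).find?
        (fun (j : Nat) => decide (s ≤ (j : Int)) && pvGood cs j)).map (fun k => (k : Int)) := by
  induction fuel with
  | zero => intro pos h; omega
  | succ fuel ih =>
    intro pos hf hpos hls
    rw [pvBLoop_succ]
    by_cases hcond : s ≤ (pos : Int) ∧ pvTestP cs (pos : Int)
    · rw [if_pos hcond]
      have hlt : pos < cs.length := by have := pvTestP_lt cs pos hcond.2; omega
      rw [show cs.length - pos = (cs.length - (pos + 1)) + 1 from by omega, List.range'_succ,
        List.find?_cons]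
      have : (decide (s ≤ (pos : Int)) && pvGood cs pos) = true := by
        rw [pvGood_linestart cs pos hls]
        rw [decide_eq_true hcond.1, decide_eq_true hcond.2]
        rfl
      simp [this]
    · rw [if_neg hcond]
      have hposfail : (decide (s ≤ (pos : Int)) && pvGood cs pos) = false := by
        rw [pvGood_linestart cs pos hls]
        by_cases h1 : s ≤ (pos : Int) <;> by_cases h2 : pvTestP cs (pos : Int) <;>
          simp_all
      by_cases hEnd : PySem.Chars.findFrom cs ['\n'] (pos : Int) none = -1
      · rw [if_pos hEnd]
        have hnoNl : ∀ i : Nat, pos ≤ i → cs[i]? ≠ some '\n' := by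
          have hinf := (PySem.Chars.findFrom_natCast_eq_neg_one_iff cs ['\n'] pos hpos).mp hEnd
          intro i hi hmem
          apply hinf
          have : ['\n'] <+: cs.drop i := (pvNlAt cs i).mpr hmem
          have hdd : cs.drop i = (cs.drop pos).drop (i - pos) := by
            rw [List.drop_drop]; congr 1; omega
          exact (hdd ▸ this).isInfix.trans (List.drop_suffix _ _).isInfix
        have hnone : (List.range' pos (cs.length - pos)).find?
            (fun (j : Nat) => decide (s ≤ (j : Int)) && pvGood cs j) = none := by
          rw [List.find?_eq_none]
          intro j hj
          have hjm := List.mem_range'_1.mp hj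
          rcases Nat.eq_or_lt_of_le hjm.1 with heq | hlt
          · rw [← heq]; simp [hposfail]
          · rw [pvGood_not_linestart cs j (by omega) (hnoNl (j - 1) (by omega))]
            simp
        simp [hnone]
      · rw [if_neg hEnd]
        obtain ⟨h1, h2, h3⟩ := PySem.Chars.findFrom_natCast_spec cs ['\n'] pos hpos hEnd
        set nl := PySem.Chars.findFrom cs ['\n'] (pos : Int) none with hnl
        have hq : cs[nl.toNat]? = some '\n' := (pvNlAt cs nl.toNat).mp h2
        have hqlen : nl.toNat < cs.length := (List.getElem?_eq_some_iff.mp hq).1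
        have hposq : pos ≤ nl.toNat := by omega
        have hmin : ∀ i : Nat, pos ≤ i → i < nl.toNat → cs[i]? ≠ some '\n' := by
          intro i hi1 hi2 hmem
          exact h3 i hi1 hi2 ((pvNlAt cs i).mpr hmem)
        rw [ih (nl.toNat + 1) (by omega) (by omega) (Or.inr ⟨by omega, by simpa using hq⟩)]
        have hsplit : List.range' pos (cs.length - pos) =
            List.range' pos (nl.toNat + 1 - pos) ++
              List.range' (nl.toNat + 1) (cs.length - (nl.toNat + 1)) := by
          have := List.range'_append (s := pos) (m := nl.toNat + 1 - pos)
            (n := cs.length - (nl.toNat + 1)) (step := 1)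
          rw [show pos + 1 * (nl.toNat + 1 - pos) = nl.toNat + 1 from by omega] at this
          rw [show (nl.toNat + 1 - pos) + (cs.length - (nl.toNat + 1)) = cs.length - pos
            from by omega] at this
          exact this.symm
        rw [hsplit, List.find?_append]
        have hfirst : (List.range' pos (nl.toNat + 1 - pos)).find?
            (fun (j : Nat) => decide (s ≤ (j : Int)) && pvGood cs j) = none := by
          rw [List.find?_eq_none]
          intro j hj
          have hjm := List.mem_range'_1.mp hj
          rcases Nat.eq_or_lt_of_le hjm.1 with heq | hlt
          · rw [← heq]; simp [hposfail]
          · rw [pvGood_not_linestart cs j (by omega)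
              (hmin (j - 1) (by omega) (by omega))]
            simp
        rw [hfirst, Option.none_or]

theorem pvFind?_congr {α : Type} (l : List α) (p q : α → Bool) (h : ∀ x ∈ l, p x = q x) :
    l.find? p = l.find? q := by
  induction l with
  | nil => rfl
  | cons a t ih =>
    rw [List.find?_cons, List.find?_cons, h a (by simp)]
    cases q a <;> simp [ih (fun x hx => h x (by simp [hx]))]

theorem pv_pos_agree (cs : List Char) (s : Int) (hs : 0 ≤ s) :
    pvALoop (((cs.length : Int) - s).toNat + 1) cs s = pvBLoop (cs.length + 1) cs s 0 := by
  have hsnat : s = ((s.toNat : Nat) : Int) := by omega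
  rw [pvBLoop_char cs (cs.length + 1) s 0 (by omega) (by omega) (Or.inl rfl)]
  rw [hsnat, pvALoop_char cs _ s.toNat (by omega)]
  simp only [Nat.sub_zero]
  have hfind : (List.range' 0 cs.length).find?
        (fun (j : Nat) => decide ((s.toNat : Int) ≤ (j : Int)) && pvGood cs j) =
      (List.range' s.toNat (cs.length - s.toNat)).find? (pvGood cs) := by
    by_cases hcase : s.toNat ≤ cs.length
    · have hsplit : List.range' 0 cs.length =
          List.range' 0 s.toNat ++ List.range' s.toNat (cs.length - s.toNat) := by
        have := List.range'_append (s := 0) (m := s.toNat) (n := cs.length - s.toNat) (step := 1)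
        rw [show 0 + 1 * s.toNat = s.toNat from by omega,
          show s.toNat + (cs.length - s.toNat) = cs.length from by omega] at this
        exact this.symm
      rw [hsplit, List.find?_append]
      have h1 : (List.range' 0 s.toNat).find?
          (fun (j : Nat) => decide ((s.toNat : Int) ≤ (j : Int)) && pvGood cs j) = none := by
        rw [List.find?_eq_none]
        intro j hj
        have := (List.mem_range'_1.mp hj).2
        simp only [Bool.and_eq_true, decide_eq_true_eq, not_and]
        intro hcontra
        omega
      rw [h1, Option.none_or]
      refine pvFind?_congr _ _ _ (fun j hj => ?_)
      have := (List.mem_range'_1.mp hj).1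
      have h2 : decide ((s.toNat : Int) ≤ (j : Int)) = true := by
        simp only [decide_eq_true_eq]
        omega
      rw [h2, Bool.true_and]
    · rw [show cs.length - s.toNat = 0 from by omega]
      simp only [List.range'_zero, List.find?_nil]
      rw [List.find?_eq_none]
      intro j hj
      have := (List.mem_range'_1.mp hj).2
      simp only [Bool.and_eq_true, decide_eq_true_eq, not_and]
      intro hcontra
      omega
  rw [hfind]

theorem pv_zero_agree (cs : List Char) (s : Int) (hs : s ≤ 0) (fuel : Nat)
    (hf : cs.length < fuel) :
    pvALoop fuel cs 0 = pvBLoop (cs.length + 1) cs s 0 := by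
  rw [pvBLoop_char cs _ s 0 (by omega) (by omega) (Or.inl rfl)]
  rw [show (0 : Int) = ((0 : Nat) : Int) from rfl, pvALoop_char cs fuel 0 (by omega)]
  simp only [Nat.sub_zero]
  have hfind : (List.range' 0 cs.length).find? (pvGood cs) =
      (List.range' 0 cs.length).find?
        (fun (j : Nat) => decide (s ≤ (j : Int)) && pvGood cs j) := by
    refine pvFind?_congr _ _ _ (fun j hj => ?_)
    have h2 : decide (s ≤ (j : Int)) = true := by
      simp only [decide_eq_true_eq]
      omega
    rw [h2, Bool.true_and]
  rw [hfind]

-- negative find-start reads as an offset from the end (Python slice-bound rule)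
theorem pvFindFrom_neg (cs sub : List Char) (i : Int) (h1 : -(cs.length : Int) ≤ i)
    (h2 : i < 0) :
    PySem.Chars.findFrom cs sub i none =
      PySem.Chars.findFrom cs sub ((((cs.length : Int) + i).toNat : Nat) : Int) none := by
  simp only [PySem.Chars.findFrom]
  rw [if_pos h2, if_neg (by omega : ¬ i + (cs.length : Int) < 0),
    if_neg (by omega : ¬ ((((cs.length : Int) + i).toNat : Nat) : Int) < 0)]
  rw [show i + (cs.length : Int) = ((((cs.length : Int) + i).toNat : Nat) : Int) from by omega]

theorem pvStripNilIff (l : List Char) :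
    PySem.Chars.strip l = [] ↔ l.all PySem.Chars.isspace := by
  simp only [PySem.Chars.strip, PySem.Chars.rstrip, PySem.Chars.lstrip,
    List.reverse_eq_nil_iff, List.dropWhile_eq_nil_iff, List.mem_reverse, List.all_eq_true]
  constructor
  · intro h x hx
    by_cases hws : PySem.Chars.isspace x
    · exact hws
    · have hxd : x ∈ List.dropWhile PySem.Chars.isspace l := by
        have hsplit := List.takeWhile_append_dropWhile (p := PySem.Chars.isspace) (l := l)
        rcases List.mem_append.mp (hsplit ▸ hx) with h' | h'
        · exact absurd (List.mem_takeWhile_imp h') hws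
        · exact h'
      exact h x hxd
  · intro h x hx
    exact h x ((List.dropWhile_sublist _).subset hx)

theorem pvStripNeNil (l : List Char) (c : Char) (hc : c ∈ l)
    (hw : PySem.Chars.isspace c = false) : PySem.Chars.strip l ≠ [] := by
  intro h
  have := (pvStripNilIff l).mp h
  rw [List.all_eq_true] at this
  exact absurd (this c hc) (by simp [hw])

theorem pvTakeWhileAll (c : Char) (l : List Char) (h : ∀ x ∈ l, x ≠ c) :
    l.takeWhile (· ≠ c) = l := by
  induction l with
  | nil => rfl
  | cons a t ih =>
    rw [List.takeWhile_cons_of_pos (by simp [h a (by simp)])]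
    rw [ih (fun x hx => h x (by simp [hx]))]

theorem pvTakeWhileEqTake (c : Char) : ∀ (l : List Char) (k : Nat), l[k]? = some c →
    (∀ i, i < k → l[i]? ≠ some c) → l.takeWhile (· ≠ c) = l.take k := by
  intro l
  induction l with
  | nil => intro k hk; simp at hk
  | cons a t ih =>
    intro k hk hmin
    cases k with
    | zero =>
      simp only [List.getElem?_cons_zero, Option.some_inj] at hk
      subst hk
      rw [List.takeWhile_cons_of_neg (by simp), List.take_zero]
    | succ k =>
      have ha : a ≠ c := by
        intro h
        exact hmin 0 (by omega) (by simp [h])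
      rw [List.takeWhile_cons_of_pos (by simp [ha]), List.take_succ_cons]
      rw [ih k (by simpa using hk) (fun i hi => by
        have := hmin (i + 1) (by omega)
        simpa using this)]

theorem pvPrefixTakeWhile (P : Char → Bool) : ∀ (p l : List Char), p <+: l →
    (∀ x ∈ p, P x = true) → p <+: l.takeWhile P := by
  intro p
  induction p with
  | nil => simp
  | cons a t ih =>
    intro l hp hP
    obtain ⟨r, rfl⟩ := hp
    rw [List.cons_append, List.takeWhile_cons_of_pos (hP a (by simp))]
    exact List.cons_prefix_cons.mpr ⟨rfl, ih (t ++ r) ⟨r, rfl⟩ (fun x hx => hP x (by simp [hx]))⟩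

-- the `between` slice both loops strip is the rest of the line at q
theorem pvSliceLine (cs : List Char) (q : Nat) (hq : q + 3 ≤ cs.length) :
    PySem.List.slice cs (some ((q : Int) + 3)) (some (pvEol cs (q : Int))) =
      (pvLineAt cs q).drop 3 := by
  unfold pvEol pvLineAt
  by_cases hEnd : PySem.Chars.findFrom cs ['\n'] (q : Int) none = -1
  · rw [if_pos hEnd]
    have hno : ∀ x ∈ cs.drop q, x ≠ '\n' := by
      have hinf := (PySem.Chars.findFrom_natCast_eq_neg_one_iff cs ['\n'] q (by omega)).mp hEnd
      intro x hx h
      subst h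
      exact hinf ((List.singleton_infix_iff _ _).mpr hx)
    rw [pvTakeWhileAll '\n' _ hno]
    rw [show ((q : Int) + 3) = (((q + 3 : Nat)) : Int) from by push_cast; ring]
    rw [show ((cs.length : Int)) = (((cs.length : Nat)) : Int) from rfl]
    rw [PySem.List.slice_natCast]
    rw [List.take_of_length_le (by simp)]
    rw [List.drop_drop]
  · rw [if_neg hEnd]
    obtain ⟨h1, h2, h3⟩ := PySem.Chars.findFrom_natCast_spec cs ['\n'] q (by omega) hEnd
    set f := PySem.Chars.findFrom cs ['\n'] (q : Int) none with hfdef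
    have hq' : cs[f.toNat]? = some '\n' := (pvNlAt cs f.toNat).mp h2
    have hflen : f.toNat < cs.length := (List.getElem?_eq_some_iff.mp hq').1
    have hfq : q ≤ f.toNat := by omega
    have htw : (cs.drop q).takeWhile (· ≠ '\n') = (cs.drop q).take (f.toNat - q) := by
      apply pvTakeWhileEqTake
      · rw [List.getElem?_drop, show q + (f.toNat - q) = f.toNat from by omega]
        exact hq'
      · intro i hi
        rw [List.getElem?_drop]
        intro hmem
        exact h3 (q + i) (by omega) (by omega) ((pvNlAt cs (q + i)).mpr hmem)
    rw [htw]
    have hff : f = ((f.toNat : Nat) : Int) := by omega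
    rw [show ((q : Int) + 3) = (((q + 3 : Nat)) : Int) from by push_cast; ring, hff,
      PySem.List.slice_natCast]
    rw [List.drop_take, List.drop_drop]
    congr 1

-- the D_-level fence-line description coincides with the computational test
theorem pvTest_iff_line (cs : List Char) (q : Nat) (hq3 : q + 3 ≤ cs.length) :
    pvTestP cs (q : Int) ↔ pvIsFenceLine (pvLineAt cs q) = true := by
  unfold pvTestP pvIsFenceLine
  rw [pvSliceLine cs q hq3, PySem.List.slice_from_natCast]
  rw [Bool.and_eq_true, List.isPrefixOf_iff_prefix, pvStripNilIff]
  constructor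
  · rintro ⟨hsw, hst⟩
    have hpre := (PySem.Chars.startswith_iff _ _).mp hsw
    exact ⟨pvPrefixTakeWhile _ _ _ hpre (by intro x hx; fin_cases hx <;> decide), hst⟩
  · rintro ⟨hpre, hst⟩
    exact ⟨(PySem.Chars.startswith_iff _ _).mpr (hpre.trans (List.takeWhile_prefix _)), hst⟩

-- the test at a negative position is the test at the wrapped-around position
theorem pvTest_neg_shift (cs : List Char) (i : Int) (h1 : -(cs.length : Int) < i)
    (h2 : i ≤ -4) :
    pvTestP cs i ↔ pvTestP cs ((((cs.length : Int) + i).toNat : Nat) : Int) := by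
  have hq : ((((cs.length : Int) + i).toNat : Nat) : Int) = (cs.length : Int) + i := by omega
  unfold pvTestP
  have hslice1 : PySem.List.slice cs (some i) none =
      PySem.List.slice cs (some ((((cs.length : Int) + i).toNat : Nat) : Int)) none := by
    rw [PySem.List.slice_some_none, PySem.List.slice_some_none]
    congr 1
    simp only [PySem.List.clampIdx]
    split_ifs <;> omega
  have hEol : pvEol cs i = pvEol cs ((((cs.length : Int) + i).toNat : Nat) : Int) := by
    unfold pvEol
    rw [pvFindFrom_neg cs ['\n'] i (by omega) (by omega)]
  have hslice2 : ∀ e : Int, PySem.List.slice cs (some (i + 3)) (some e) =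
      PySem.List.slice cs (some (((((cs.length : Int) + i).toNat : Nat) : Int) + 3)) (some e) := by
    intro e
    simp only [PySem.List.slice]
    have hc : PySem.List.clampIdx cs.length (i + 3) =
        PySem.List.clampIdx cs.length (((((cs.length : Int) + i).toNat : Nat) : Int) + 3) := by
      simp only [PySem.List.clampIdx]
      split_ifs <;> omega
    rw [hc]
  rw [hslice1, hEol, hslice2]

theorem pvTest_neg3 (cs : List Char) (h : 3 < cs.length) : ¬ pvTestP cs (-3) := by
  rintro ⟨hsw, hst⟩
  have hclamp : PySem.List.clampIdx cs.length (-3) = cs.length - 3 := by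
    simp only [PySem.List.clampIdx]
    split_ifs <;> omega
  rw [PySem.List.slice_some_none, hclamp] at hsw
  have hpre := (PySem.Chars.startswith_iff _ _).mp hsw
  have heq : pvFence = cs.drop (cs.length - 3) :=
    hpre.eq_of_length (by simp only [List.length_drop]; simp [pvFence]; omega)
  have hnone : PySem.Chars.findFrom cs ['\n'] (((cs.length - 3 : Nat)) : Int) none = -1 := by
    rw [PySem.Chars.findFrom_natCast_eq_neg_one_iff cs ['\n'] (cs.length - 3) (by omega)]
    rw [← heq]
    intro hinf
    have := (List.singleton_infix_iff _ _).mp hinf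
    simp [pvFence] at this
  have heol : pvEol cs (-3) = (cs.length : Int) := by
    unfold pvEol
    rw [pvFindFrom_neg cs ['\n'] (-3) (by omega) (by omega)]
    rw [show ((((cs.length : Int) + (-3)).toNat : Nat) : Int) = (((cs.length - 3 : Nat)) : Int)
      from by omega]
    rw [if_pos hnone]
  rw [heol] at hst
  have hcs : PySem.List.slice cs (some ((-3 : Int) + 3)) (some ((cs.length : Int))) = cs := by
    rw [show (-3 : Int) + 3 = ((0 : Nat) : Int) from by norm_num]
    rw [show ((cs.length : Int)) = (((cs.length : Nat)) : Int) from rfl, PySem.List.slice_natCast]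
    simp
  rw [hcs] at hst
  have hmem : '-' ∈ cs := by
    have : '-' ∈ cs.drop (cs.length - 3) := by
      rw [← heq]
      simp [pvFence]
    exact List.mem_of_mem_drop this
  exact pvStripNeNil cs '-' hmem (by decide) hst

theorem pvTest_neg12 (cs : List Char) (i : Int) (h1 : -2 ≤ i) (h2 : i ≤ -1) :
    ¬ pvTestP cs i := by
  rintro ⟨hsw, -⟩
  rw [PySem.List.slice_some_none] at hsw
  have hlen := ((PySem.Chars.startswith_iff _ _).mp hsw).length_le
  have hcl : cs.length - 2 ≤ PySem.List.clampIdx cs.length i := by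
    simp only [PySem.List.clampIdx]
    split_ifs <;> omega
  simp only [List.length_drop] at hlen
  simp [pvFence] at hlen
  omega

theorem pvALoop_step (cs : List Char) (fuel : Nat) (s : Int) (hs : s < (cs.length : Int))
    (hns : s ≠ 0) (hfail : ¬(PySem.List.pyGet? cs (s - 1) = some '\n' ∧ pvTestP cs s)) :
    pvALoop (fuel + 1) cs s = pvALoop fuel cs (s + 1) := by
  rw [pvALoop_succ, if_pos hs]
  by_cases hnl : PySem.List.pyGet? cs (s - 1) = some '\n'
  · rw [if_pos (Or.inr hnl), if_neg (fun ht => hfail ⟨hnl, ht⟩)]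
  · rw [if_neg (not_or.mpr ⟨hns, hnl⟩)]

theorem pvALoop_ret (cs : List Char) (fuel : Nat) (s : Int) (hs : s < (cs.length : Int))
    (hline : s = 0 ∨ PySem.List.pyGet? cs (s - 1) = some '\n') (ht : pvTestP cs s) :
    pvALoop (fuel + 1) cs s = some s := by
  rw [pvALoop_succ, if_pos hs, if_pos hline, if_pos ht]

theorem pvALoop_neg_skip (cs : List Char) : ∀ (fuel : Nat) (s : Int),
    ((cs.length : Int) - s).toNat < fuel → -(cs.length : Int) < s → s ≤ 0 →
    (∀ i : Int, s ≤ i → i ≤ -4 →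
      ¬(PySem.List.pyGet? cs (i - 1) = some '\n' ∧ pvTestP cs i)) →
    pvALoop fuel cs s = pvALoop fuel cs 0 := by
  intro fuel
  induction fuel with
  | zero => intro s h; omega
  | succ fuel ih =>
    intro s hf h1 h2 hno
    rcases h2.lt_or_eq with hs0 | rfl
    · have hfail : ¬(PySem.List.pyGet? cs (s - 1) = some '\n' ∧ pvTestP cs s) := by
        rcases (show s ≤ -4 ∨ s = -3 ∨ s = -2 ∨ s = -1 from by omega) with h | h | h | h
        · exact hno s le_rfl h
        · rintro ⟨-, ht⟩
          exact pvTest_neg3 cs (by omega) (h ▸ ht)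
        · rintro ⟨-, ht⟩
          exact pvTest_neg12 cs s (by omega) (by omega) ht
        · rintro ⟨-, ht⟩
          exact pvTest_neg12 cs s (by omega) (by omega) ht
      rw [pvALoop_step cs fuel s (by omega) (by omega) hfail]
      rw [ih (s + 1) (by omega) (by omega) (by omega)
        (fun i hi1 hi2 => hno i (by omega) hi2)]
      exact pvALoop_fuel cs fuel (fuel + 1) 0 (by omega) (by omega)
    · rfl

theorem pvALoop_neg_hit (cs : List Char) : ∀ (fuel : Nat) (s : Int),
    ((cs.length : Int) - s).toNat < fuel → -(cs.length : Int) < s → s < 0 →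
    (∃ i : Int, s ≤ i ∧ i ≤ -4 ∧
      PySem.List.pyGet? cs (i - 1) = some '\n' ∧ pvTestP cs i) →
    ∃ j, j < 0 ∧ pvALoop fuel cs s = some j := by
  intro fuel
  induction fuel with
  | zero => intro s h; omega
  | succ fuel ih =>
    intro s hf h1 h2 hex
    obtain ⟨i, hi1, hi2, hnl, ht⟩ := hex
    by_cases hs : PySem.List.pyGet? cs (s - 1) = some '\n' ∧ pvTestP cs s
    · exact ⟨s, h2, pvALoop_ret cs fuel s (by omega) (Or.inr hs.1) hs.2⟩
    · have hne : s ≠ i := fun he => hs (he ▸ ⟨hnl, ht⟩)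
      rw [pvALoop_step cs fuel s (by omega) (by omega) hs]
      exact ih (s + 1) (by omega) (by omega) (by omega) ⟨i, by omega, hi2, hnl, ht⟩

theorem pvBLoop_zero_nonneg (cs : List Char) (s j : Int)
    (h : pvBLoop (cs.length + 1) cs s 0 = some j) : 0 ≤ j := by
  rw [pvBLoop_char cs _ s 0 (by omega) (by omega) (Or.inl rfl)] at h
  rcases hfind : (List.range' 0 (cs.length - 0)).find?
      (fun (j : Nat) => decide (s ≤ (j : Int)) && pvGood cs j) with _ | k
  · rw [hfind] at h
    simp at h
  · rw [hfind] at h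
    simp at h
    omega

-- ===== VERDICT (by name: the statement is the Claim_ definition above) =====
theorem find_fence_py_spec : Claim_unchanged_find_fence_py := by
  intro text start hdom hpre hnd
  unfold Pre_find_fence_py at hpre
  unfold find_fence_py find_fence_py_alt
  rcases (show 0 ≤ start ∨ start < 0 from by omega) with hs | hs
  · exact pv_pos_agree text.toList start hs
  · have hlen : -(text.toList.length : Int) < start := by omega
    have hno : ∀ i : Int, start ≤ i → i ≤ -4 →
        ¬(PySem.List.pyGet? text.toList (i - 1) = some '\n' ∧ pvTestP text.toList i) := by
      intro i hi1 hi2 hcon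
      apply hnd
      unfold D_find_fence_py
      refine ⟨hs, i, PySem.List.mem_pyRange_one.mpr ⟨by omega, by omega⟩, hcon.1, ?_⟩
      have hq3 : ((text.toList.length : Int) + i).toNat + 3 ≤ text.toList.length := by omega
      exact (pvTest_iff_line _ _ hq3).mp ((pvTest_neg_shift _ i (by omega) hi2).mp hcon.2)
    rw [pvALoop_neg_skip text.toList _ start (by omega) hlen (by omega) hno]
    exact pv_zero_agree text.toList start (by omega) _ (by omega)

theorem find_fence_py_changed : Claim_changed_find_fence_py := by
  unfold Claim_changed_find_fence_py; decide

theorem find_fence_py_tight : Claim_exact_find_fence_py := by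
  intro text start hdom hpre hd
  unfold Pre_find_fence_py at hpre
  unfold D_find_fence_py at hd
  obtain ⟨hs, i, hmem, hnl, hfl⟩ := hd
  have hm := PySem.List.mem_pyRange_one.mp hmem
  have hi1 : start ≤ i := by omega
  have hi2 : i < -3 := hm.2
  have hlen : -(text.toList.length : Int) < start := by omega
  have hq3 : ((text.toList.length : Int) + i).toNat + 3 ≤ text.toList.length := by omega
  have ht : pvTestP text.toList i :=
    (pvTest_neg_shift _ i (by omega) (by omega)).mpr ((pvTest_iff_line _ _ hq3).mpr hfl)
  obtain ⟨j, hj, hA⟩ := pvALoop_neg_hit text.toList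
    (((text.toList.length : Int) - start).toNat + 1) start (by omega) hlen hs
    ⟨i, hi1, by omega, hnl, ht⟩
  unfold find_fence_py find_fence_py_alt
  rw [hA]
  intro heq
  have := pvBLoop_zero_nonneg text.toList start j heq.symm
  omega
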